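-- pv_equiv track=rewrite | github.com/lucasdeeiroz/robot_runner | src/ui/run_command_window.py | _generate_locators
-- ===== SOURCE A (Python) =====
-- from typing import Dict, List, Optional, Tuple
--
-- def _generate_locators(data: Dict) -> List[Tuple[str, str, str]]:
--     """Generates a list of (Label, Value, Tooltip) tuples for locators."""
--     locators = []
--
--     # 1. Appium Accessibility ID
--     if content_desc := data.get("content-desc"):
--         locators.append(("Appium: Accessibility ID", content_desc, f"Copy content-desc: '{content_desc}'"))
--
--     # 2. UiAutomator2 UiSelectors
--     if res_id := data.get("resource-id"):
--         val = f'new UiSelector().resourceId("{res_id}")'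
--         locators.append(("UiAutomator2: Resource ID", val, f"Copy UiSelector: {val}"))
--
--     if text := data.get("text"):
--         val = f'new UiSelector().text("{text}")'
--         locators.append(("UiAutomator2: Text", val, f"Copy UiSelector: {val}"))
--
--     if content_desc:
--         val = f'new UiSelector().description("{content_desc}")'
--         locators.append(("UiAutomator2: Description", val, f"Copy UiSelector: {val}"))
--
--     if class_name := data.get("class"):
--         val = f'new UiSelector().className("{class_name}")'
--         locators.append(("UiAutomator2: Class Name", val, f"Copy UiSelector: {val}"))
--
--     # 3. XPath (Fallback/Specific)
--     for attr in ["resource-id", "text", "content-desc", "class"]: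
--         if attr_value := data.get(attr):
--             xpath = f"//{attr_value}" if attr == "class" else f"//*[@{attr}='{attr_value}']"
--             display_val = (attr_value[:20] + '...') if len(attr_value) > 23 else attr_value
--             locators.append((f"XPath: {attr.replace('_', ' ').title()}", xpath, f"Copy XPath: {xpath}"))
--
--     # 4. Full XPath
--     if full_xpath := data.get("xpath"):
--          locators.append(("Full XPath", full_xpath, f"Copy Full XPath: {full_xpath}"))
--
--     return locators
-- ===== SOURCE B (Python) =====
-- def _generate_locators(data):
--     """Generates a list of (Label, Value, Tooltip) tuples for locators."""
--     specs = [
--         ("content-desc", "Appium: Accessibility ID",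
--          lambda v: v, lambda val: f"Copy content-desc: '{val}'"),
--         ("resource-id", "UiAutomator2: Resource ID",
--          lambda v: f'new UiSelector().resourceId("{v}")', lambda val: f"Copy UiSelector: {val}"),
--         ("text", "UiAutomator2: Text",
--          lambda v: f'new UiSelector().text("{v}")', lambda val: f"Copy UiSelector: {val}"),
--         ("content-desc", "UiAutomator2: Description",
--          lambda v: f'new UiSelector().description("{v}")', lambda val: f"Copy UiSelector: {val}"),
--         ("class", "UiAutomator2: Class Name",
--          lambda v: f'new UiSelector().className("{v}")', lambda val: f"Copy UiSelector: {val}"),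
--         ("resource-id", "XPath: Resource-Id",
--          lambda v: f"//*[@resource-id='{v}']", lambda val: f"Copy XPath: {val}"),
--         ("text", "XPath: Text",
--          lambda v: f"//*[@text='{v}']", lambda val: f"Copy XPath: {val}"),
--         ("content-desc", "XPath: Content-Desc",
--          lambda v: f"//*[@content-desc='{v}']", lambda val: f"Copy XPath: {val}"),
--         ("class", "XPath: Class",
--          lambda v: f"//{v}", lambda val: f"Copy XPath: {val}"),
--         ("xpath", "Full XPath",
--          lambda v: v, lambda val: f"Copy Full XPath: {val}"),
--     ]
--     return [(label, val, tip(val))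
--             for key, label, mk, tip in specs
--             for v in [data.get(key)] if v
--             for val in [mk(v)]]
-- ===== Notes on version B (the rewrite author's own statement) =====
-- stated objective: simpler
-- what changed: The sequence of hand-written if/append blocks and the separate XPath loop become one list comprehension over a single 10-row data-driven spec table (key, label, value builder, tooltip builder); the dead display_val truncation is dropped.
import Mathlib
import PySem

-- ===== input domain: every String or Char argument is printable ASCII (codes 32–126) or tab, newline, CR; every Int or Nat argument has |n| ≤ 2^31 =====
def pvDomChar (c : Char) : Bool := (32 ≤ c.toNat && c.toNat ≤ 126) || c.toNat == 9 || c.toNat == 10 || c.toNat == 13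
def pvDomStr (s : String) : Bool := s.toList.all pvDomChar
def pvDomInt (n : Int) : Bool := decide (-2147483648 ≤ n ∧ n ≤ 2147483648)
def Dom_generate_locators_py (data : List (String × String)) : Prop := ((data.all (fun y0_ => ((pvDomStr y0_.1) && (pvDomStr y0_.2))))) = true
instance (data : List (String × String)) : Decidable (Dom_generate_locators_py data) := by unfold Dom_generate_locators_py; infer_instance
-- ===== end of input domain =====

-- B replaces A's sequence of in-line if/append blocks by one comprehension over a 10-row
-- data-driven spec table (key, label, value builder, tooltip builder); objective: simpler.

-- shared primitive: `data.get(k)` on the dict, then Python truthiness of the result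
-- (`if v := data.get(k)`: some v with v nonempty, else none)
def getTruthy (data : List (String × String)) (k : String) : Option String :=
  match PySem.Dict.get? (PySem.Dict.mk data) k with
  | some v => if v = "" then none else some v
  | none => none

-- ===== PORT A =====
-- str.title over chars: uppercase a letter after a non-letter, lowercase otherwise
-- (exact for the ASCII strings it is applied to here; A only calls it on literal attr names)
def pyTitleAux : Bool → List Char → List Char
  | _, [] => []
  | prevAlpha, c :: cs =>
    (if prevAlpha then c.toLower else c.toUpper) :: pyTitleAux c.isAlpha cs

def pyTitle (s : String) : String := String.ofList (pyTitleAux false s.toList)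

def generate_locators_py (data : List (String × String)) : List (String × String × String) :=
  let locators : List (String × String × String) := []
  -- 1. Appium Accessibility ID  (content_desc := data.get("content-desc"), reused in block 2)
  let cd? := getTruthy data "content-desc"
  let locators := match cd? with
    | some content_desc =>
        locators ++ [("Appium: Accessibility ID", content_desc,
                      "Copy content-desc: '" ++ content_desc ++ "'")]
    | none => locators
  -- 2. UiAutomator2 UiSelectors
  let locators := match getTruthy data "resource-id" with
    | some res_id =>
        let val := "new UiSelector().resourceId(\"" ++ res_id ++ "\")"
        locators ++ [("UiAutomator2: Resource ID", val, "Copy UiSelector: " ++ val)]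
    | none => locators
  let locators := match getTruthy data "text" with
    | some text =>
        let val := "new UiSelector().text(\"" ++ text ++ "\")"
        locators ++ [("UiAutomator2: Text", val, "Copy UiSelector: " ++ val)]
    | none => locators
  let locators := match cd? with
    | some content_desc =>
        let val := "new UiSelector().description(\"" ++ content_desc ++ "\")"
        locators ++ [("UiAutomator2: Description", val, "Copy UiSelector: " ++ val)]
    | none => locators
  let locators := match getTruthy data "class" with
    | some class_name =>
        let val := "new UiSelector().className(\"" ++ class_name ++ "\")"
        locators ++ [("UiAutomator2: Class Name", val, "Copy UiSelector: " ++ val)]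
    | none => locators
  -- 3. XPath (Fallback/Specific)
  let locators := List.foldl (fun locs attr =>
      match getTruthy data attr with
      | some attr_value =>
          let xpath := if attr = "class" then "//" ++ attr_value
                       else "//*[@" ++ attr ++ "='" ++ attr_value ++ "']"
          -- display_val is computed and never used in A; ported for fidelity
          let _display_val := if PySem.Str.len attr_value > 23
                              then PySem.Str.slice attr_value none (some 20) ++ "..."
                              else attr_value
          locs ++ [("XPath: " ++ pyTitle (PySem.Str.replace attr "_" " "), xpath,
                    "Copy XPath: " ++ xpath)]
      | none => locs)
    locators ["resource-id", "text", "content-desc", "class"]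
  -- 4. Full XPath
  let locators := match getTruthy data "xpath" with
    | some full_xpath =>
        locators ++ [("Full XPath", full_xpath, "Copy Full XPath: " ++ full_xpath)]
    | none => locators
  locators

-- ===== PORT B =====
-- the spec table of Source B: (key, label, value builder, tooltip builder)
def locSpecs : List (String × String × (String → String) × (String → String)) :=
  [ ("content-desc", "Appium: Accessibility ID",
     fun v => v, fun val => "Copy content-desc: '" ++ val ++ "'"),
    ("resource-id", "UiAutomator2: Resource ID",
     fun v => "new UiSelector().resourceId(\"" ++ v ++ "\")", fun val => "Copy UiSelector: " ++ val),
    ("text", "UiAutomator2: Text",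
     fun v => "new UiSelector().text(\"" ++ v ++ "\")", fun val => "Copy UiSelector: " ++ val),
    ("content-desc", "UiAutomator2: Description",
     fun v => "new UiSelector().description(\"" ++ v ++ "\")", fun val => "Copy UiSelector: " ++ val),
    ("class", "UiAutomator2: Class Name",
     fun v => "new UiSelector().className(\"" ++ v ++ "\")", fun val => "Copy UiSelector: " ++ val),
    ("resource-id", "XPath: Resource-Id",
     fun v => "//*[@resource-id='" ++ v ++ "']", fun val => "Copy XPath: " ++ val),
    ("text", "XPath: Text",
     fun v => "//*[@text='" ++ v ++ "']", fun val => "Copy XPath: " ++ val),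
    ("content-desc", "XPath: Content-Desc",
     fun v => "//*[@content-desc='" ++ v ++ "']", fun val => "Copy XPath: " ++ val),
    ("class", "XPath: Class",
     fun v => "//" ++ v, fun val => "Copy XPath: " ++ val),
    ("xpath", "Full XPath",
     fun v => v, fun val => "Copy Full XPath: " ++ val) ]

def generate_locators_py_alt (data : List (String × String)) : List (String × String × String) :=
  locSpecs.flatMap (fun spec =>
    match getTruthy data spec.1 with
    | some v =>
        let val := spec.2.2.1 v
        [(spec.2.1, val, spec.2.2.2 val)]
    | none => [])

-- ===== PRECONDITION & SPEC =====
def Spec_generate_locators_py (data : List (String × String)) (out : List (String × String × String)) : Prop := out = generate_locators_py_alt data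
instance (data : List (String × String)) (out : List (String × String × String)) : Decidable (Spec_generate_locators_py data out) := by unfold Spec_generate_locators_py; infer_instance

-- ===== CLAIM (what is proved, stated in full; the proofs are below) =====
def Claim_equal_generate_locators_py : Prop := ∀ (data : List (String × String)), Dom_generate_locators_py data → Spec_generate_locators_py data (generate_locators_py data)

-- ===== LEMMAS AND PROOFS =====

-- ===== VERDICT (by name: the statement is the Claim_ definition above) =====
theorem generate_locators_py_spec : Claim_equal_generate_locators_py := by
  intro data _
  unfold Spec_generate_locators_py generate_locators_py generate_locators_py_alt
  simp only [locSpecs, List.flatMap_cons, List.flatMap_nil, List.foldl_cons, List.foldl_nil]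
  generalize getTruthy data "content-desc" = cd
  generalize getTruthy data "resource-id" = rid
  generalize getTruthy data "text" = tx
  generalize getTruthy data "class" = cl
  generalize getTruthy data "xpath" = xp
  rcases cd with _ | cd <;> rcases rid with _ | rid <;> rcases tx with _ | tx <;>
    rcases cl with _ | cl <;> rcases xp with _ | xp <;> rfl
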